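-- pv_equiv track=rewrite | github.com/hustlrr/leetcode | generate_pyfile.py | remove_redundant_blank
-- ===== SOURCE A (Python) =====
-- def remove_redundant_blank(codes):
--     new_codes = []
--     for code in codes:
--         tmp = ''
--         flag = False
--         idx = 0
--         while idx < len(code):
--             if code[idx].isalnum():
--                 flag = True
--             if flag and idx < len(code)-1 and code[idx].isspace() and code[idx+1].isspace():
--                 idx += 1
--                 continue
--             tmp += code[idx]
--             idx += 1
--         new_codes.append(tmp)
--     return '\n'.join(new_codes)
-- ===== SOURCE B (Python) =====
-- def remove_redundant_blank(codes):
--     out_lines = []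
--     for code in codes:
--         parts = []
--         seen = False
--         i = 0
--         n = len(code)
--         while i < n:
--             ws = code[i].isspace()
--             j = i
--             while j < n and code[j].isspace() == ws:
--                 j += 1
--             run = code[i:j]
--             if ws:
--                 parts.append(run[-1] if seen else run)
--             else:
--                 if any(ch.isalnum() for ch in run):
--                     seen = True
--                 parts.append(run)
--             i = j
--         out_lines.append(''.join(parts))
--     return '\n'.join(out_lines)
-- ===== Notes on version B (the rewrite author's own statement) =====
-- stated objective: alternative
-- what changed: B splits each line into maximal whitespace/non-whitespace runs and emits each run wholesale (only the last char of a whitespace run once an alnum char was seen), replacing A's per-character scan with a skip flag and one-char lookahead.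
import Mathlib
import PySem

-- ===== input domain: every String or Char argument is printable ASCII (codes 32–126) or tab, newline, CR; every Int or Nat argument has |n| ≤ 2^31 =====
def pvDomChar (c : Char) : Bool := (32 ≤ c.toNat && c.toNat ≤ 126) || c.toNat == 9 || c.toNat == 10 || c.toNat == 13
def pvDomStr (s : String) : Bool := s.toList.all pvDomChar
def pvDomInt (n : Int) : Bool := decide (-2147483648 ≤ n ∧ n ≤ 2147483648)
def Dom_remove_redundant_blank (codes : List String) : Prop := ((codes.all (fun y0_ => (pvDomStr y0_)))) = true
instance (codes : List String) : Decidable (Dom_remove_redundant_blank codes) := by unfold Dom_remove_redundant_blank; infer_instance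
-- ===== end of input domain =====

-- B processes each line as maximal whitespace/non-whitespace runs (emitting a whitespace run's last char once an alnum was seen) instead of A's per-character lookahead scan with a skip flag; objective: alternative decomposition, same cost.


-- ===== PORT A =====
-- A's inner while loop: char-by-char scan with flag and one-char lookahead; the last
-- character is always emitted (the skip requires idx < len-1), so it is its own case.
def pvALine : List Char → Bool → List Char
  | [], _ => []
  | [c], _ => [c]
  | c :: d :: rest, flag =>
      let flag' := flag || PySem.Chars.isalnum c
      if flag' && PySem.Chars.isspace c && PySem.Chars.isspace d then
        pvALine (d :: rest) flag'
      else
        c :: pvALine (d :: rest) flag'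

def remove_redundant_blank (codes : List String) : String :=
  PySem.Str.join "\n" (codes.map (fun code => String.ofList (pvALine code.toList false)))

-- ===== PORT B =====
-- B's inner loop: split off the maximal run sharing the head's isspace status,
-- emit it (whole, or just its last char for a whitespace run after `seen`), recurse.
def pvBLine (code : List Char) (seen : Bool) : List Char :=
  match code with
  | [] => []
  | c :: rest =>
      let ws := PySem.Chars.isspace c
      let run := c :: rest.takeWhile (fun x => PySem.Chars.isspace x == ws)
      let rest' := rest.dropWhile (fun x => PySem.Chars.isspace x == ws)
      if ws then
        (if seen then [run.getLast!] else run) ++ pvBLine rest' seen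
      else
        run ++ pvBLine rest' (seen || run.any PySem.Chars.isalnum)
termination_by code.length
decreasing_by
  all_goals
    simp only [List.length_cons]
    exact Nat.lt_succ_of_le (List.length_dropWhile_le _ _)

def remove_redundant_blank_alt (codes : List String) : String :=
  PySem.Str.join "\n" (codes.map (fun code => String.ofList (pvBLine code.toList false)))

-- ===== PRECONDITION & SPEC =====
def Spec_remove_redundant_blank (codes : List String) (out : String) : Prop := out = remove_redundant_blank_alt codes
instance (codes : List String) (out : String) : Decidable (Spec_remove_redundant_blank codes out) := by unfold Spec_remove_redundant_blank; infer_instance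

-- ===== CLAIM (what is proved, stated in full; the proofs are below) =====
def Claim_equal_remove_redundant_blank : Prop := ∀ (codes : List String), Dom_remove_redundant_blank codes → Spec_remove_redundant_blank codes (remove_redundant_blank codes)

-- ===== LEMMAS AND PROOFS =====

-- Python's whitespace code points are disjoint from the alphanumeric ranges.
lemma space_not_alnum {c : Char} (hs : PySem.Chars.isspace c = true) :
    PySem.Chars.isalnum c = false := by
  have hv : ∀ a : Char, (a ≤ c ↔ a.toNat ≤ c.toNat) ∧ (c ≤ a ↔ c.toNat ≤ a.toNat) := by
    intro a
    constructor <;> rw [Char.le_def, UInt32.le_iff_toNat_le] <;> rfl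
  have e1 : ('A').toNat = 65 := rfl
  have e2 : ('Z').toNat = 90 := rfl
  have e3 : ('a').toNat = 97 := rfl
  have e4 : ('z').toNat = 122 := rfl
  have e5 : ('0').toNat = 48 := rfl
  have e6 : ('9').toNat = 57 := rfl
  simp only [PySem.Chars.isspace, PySem.Chars.isalnum, PySem.Chars.isalpha,
    PySem.Chars.isdigit, PySem.Chars.isupper, PySem.Chars.islower,
    Bool.or_eq_true, Bool.and_eq_true, decide_eq_true_eq, Bool.or_eq_false_iff,
    Bool.and_eq_false_iff, decide_eq_false_iff_not, hv, e1, e2, e3, e4, e5, e6] at *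
  omega

-- A's scan over a run of non-alnum characters with flag = false emits it unchanged.
lemma aline_noalnum_false (run tail : List Char) (h : ∀ c ∈ run, PySem.Chars.isalnum c = false) :
    pvALine (run ++ tail) false = run ++ pvALine tail false := by
  induction run with
  | nil => simp
  | cons c run' ih =>
    have hc : PySem.Chars.isalnum c = false := h c (by simp)
    have ih' := ih (fun x hx => h x (by simp [hx]))
    cases run' with
    | nil =>
      cases tail with
      | nil => simp [pvALine]
      | cons d t => simp [pvALine, hc]
    | cons e r =>
      simp only [List.cons_append] at ih' ⊢
      simp [pvALine, hc, ih']

-- A's scan over a run of non-space characters emits it unchanged and ORs the flag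
-- with "the run contains an alnum character".
lemma aline_nonspace (run tail : List Char) (flag : Bool)
    (h : ∀ c ∈ run, PySem.Chars.isspace c = false) :
    pvALine (run ++ tail) flag = run ++ pvALine tail (flag || run.any PySem.Chars.isalnum) := by
  induction run generalizing flag with
  | nil => simp
  | cons c run' ih =>
    have hc : PySem.Chars.isspace c = false := h c (by simp)
    have ih' := ih (fun x hx => h x (by simp [hx])) (flag := flag || PySem.Chars.isalnum c)
    cases run' with
    | nil =>
      cases tail with
      | nil => simp [pvALine]
      | cons d t => simp [pvALine, hc]
    | cons e r =>
      simp only [List.cons_append] at ih' ⊢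
      simp [pvALine, hc, ih', Bool.or_assoc]

-- A's scan over a nonempty all-space run with flag = true, followed by a non-space
-- character (or nothing), keeps only the run's last character.
lemma aline_space_true (run tail : List Char) (hne : run ≠ [])
    (h : ∀ c ∈ run, PySem.Chars.isspace c = true ∧ PySem.Chars.isalnum c = false)
    (ht : ∀ d, tail.head? = some d → PySem.Chars.isspace d = false) :
    pvALine (run ++ tail) true = run.getLast! :: pvALine tail true := by
  induction run with
  | nil => simp at hne
  | cons c run' ih =>
    have hc := h c (by simp)
    cases run' with
    | nil =>
      cases tail with
      | nil => simp [pvALine, List.getLast!]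
      | cons d t =>
        have hd : PySem.Chars.isspace d = false := ht d rfl
        simp [pvALine, hc.1, hc.2, hd, List.getLast!]
    | cons e r =>
      have he := h e (by simp)
      have ih' := ih (by simp) (fun x hx => h x (by simp at hx ⊢; tauto))
      simp only [List.cons_append] at ih' ⊢
      simp [pvALine, hc.1, hc.2, he.1, ih']

-- One unfolding of pvBLine on a cons cell, with the run/rest' lets written out.
lemma bline_cons (c : Char) (rest : List Char) (seen : Bool) :
    pvBLine (c :: rest) seen =
      (if PySem.Chars.isspace c then
        (if seen then [(c :: rest.takeWhile (fun x => PySem.Chars.isspace x == PySem.Chars.isspace c)).getLast!]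
         else c :: rest.takeWhile (fun x => PySem.Chars.isspace x == PySem.Chars.isspace c)) ++
        pvBLine (rest.dropWhile (fun x => PySem.Chars.isspace x == PySem.Chars.isspace c)) seen
      else
        (c :: rest.takeWhile (fun x => PySem.Chars.isspace x == PySem.Chars.isspace c)) ++
        pvBLine (rest.dropWhile (fun x => PySem.Chars.isspace x == PySem.Chars.isspace c))
          (seen || (c :: rest.takeWhile (fun x => PySem.Chars.isspace x == PySem.Chars.isspace c)).any PySem.Chars.isalnum)) := by
  rw [pvBLine]

-- The per-line equivalence: A's lookahead scan equals B's run-based pass.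
lemma line_eq : ∀ (n : Nat) (code : List Char), code.length ≤ n →
    ∀ flag, pvALine code flag = pvBLine code flag := by
  intro n
  induction n with
  | zero =>
    intro code hlen flag
    rw [List.length_eq_zero_iff.mp (Nat.le_zero.mp hlen)]
    simp [pvALine, pvBLine]
  | succ n ih =>
    intro code hlen flag
    cases code with
    | nil => simp [pvALine, pvBLine]
    | cons c rest =>
      cases hsp : PySem.Chars.isspace c with
      | false =>
        have hrun : ∀ x ∈ c :: rest.takeWhile (fun x => PySem.Chars.isspace x == false),
            PySem.Chars.isspace x = false := by
          intro x hx
          rcases List.mem_cons.mp hx with h | h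
          · rw [h]; exact hsp
          · simpa using List.mem_takeWhile_imp h
        have hlen' : (rest.dropWhile (fun x => PySem.Chars.isspace x == false)).length ≤ n := by
          have := List.length_dropWhile_le (fun x => PySem.Chars.isspace x == false) rest
          simp at hlen; omega
        rw [bline_cons, hsp]
        simp only [Bool.false_eq_true, if_false]
        conv_lhs => rw [show c :: rest =
          (c :: rest.takeWhile (fun x => PySem.Chars.isspace x == false)) ++
          rest.dropWhile (fun x => PySem.Chars.isspace x == false) by
            simp [List.takeWhile_append_dropWhile]]
        rw [aline_nonspace _ _ _ hrun, ih _ hlen']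
      | true =>
        have hrun : ∀ x ∈ c :: rest.takeWhile (fun x => PySem.Chars.isspace x == true),
            PySem.Chars.isspace x = true ∧ PySem.Chars.isalnum x = false := by
          intro x hx
          have h1 : PySem.Chars.isspace x = true := by
            rcases List.mem_cons.mp hx with h | h
            · rw [h]; exact hsp
            · simpa using List.mem_takeWhile_imp h
          exact ⟨h1, space_not_alnum h1⟩
        have hlen' : (rest.dropWhile (fun x => PySem.Chars.isspace x == true)).length ≤ n := by
          have := List.length_dropWhile_le (fun x => PySem.Chars.isspace x == true) rest
          simp at hlen; omega
        have hhead : ∀ d, (rest.dropWhile (fun x => PySem.Chars.isspace x == true)).head? = some d →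
            PySem.Chars.isspace d = false := by
          intro d hd
          have hne : rest.dropWhile (fun x => PySem.Chars.isspace x == true) ≠ [] := by
            intro h; rw [h] at hd; simp at hd
          have := List.head_dropWhile_not (fun x => PySem.Chars.isspace x == true) hne
          rw [List.head?_eq_some_head hne] at hd
          simp only [Option.some.injEq] at hd
          rw [hd] at this
          simpa using this
        rw [bline_cons, hsp]
        simp only [if_true]
        conv_lhs => rw [show c :: rest =
          (c :: rest.takeWhile (fun x => PySem.Chars.isspace x == true)) ++
          rest.dropWhile (fun x => PySem.Chars.isspace x == true) by
            simp [List.takeWhile_append_dropWhile]]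
        cases flag with
        | false =>
          rw [aline_noalnum_false _ _ (fun x hx => (hrun x hx).2), ih _ hlen']
          simp
        | true =>
          rw [aline_space_true _ _ (by simp) hrun hhead, ih _ hlen']
          simp

-- ===== VERDICT (by name: the statement is the Claim_ definition above) =====
theorem remove_redundant_blank_spec : Claim_equal_remove_redundant_blank := by
  intro codes _
  unfold Spec_remove_redundant_blank remove_redundant_blank remove_redundant_blank_alt
  congr 1
  refine List.map_congr_left (fun s _ => ?_)
  rw [line_eq s.toList.length s.toList le_rfl false]
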